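-- pv_equiv track=rewrite | github.com/adrianrs928222/Funcional | main.py | compatible_with_builder
-- ===== SOURCE A (Python) =====
-- from typing import Any, Dict, List, Optional, Tuple
--
-- def compatible_with_builder(existing: List[Dict[str, Any]], candidate: Dict[str, Any]) -> bool:
--     existing_types = {x.get("pick_type") for x in existing}
--     ctype = candidate.get("pick_type")
--
--     incompatible_pairs = [
--         ("btts_yes", "btts_no"),
--         ("over_2_5", "under_3_5"),
--         ("winner", "double_chance"),
--         ("team_score_first_half", "btts_no"),
--     ]
--
--     for a, b in incompatible_pairs:
--         if ctype == a and b in existing_types: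
--             return False
--         if ctype == b and a in existing_types:
--             return False
--
--     if ctype in existing_types:
--         return False
--
--     return True
-- ===== SOURCE B (Python) =====
-- def compatible_with_builder(existing, candidate):
--     # Bitmask encoding: each of the four conflict pairs gets one bit; a pick type's
--     # mask carries the bits of every pair it belongs to.  Two distinct types are
--     # incompatible exactly when their masks intersect (each bit has exactly two
--     # owners: the endpoints of that pair); duplicates are caught by plain equality.
--     # Single pass over `existing`, no set of existing types is built.
--     masks = {
--         "btts_yes": 1,
--         "btts_no": 1 | 8,
--         "over_2_5": 2,
--         "under_3_5": 2,
--         "winner": 4,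
--         "double_chance": 4,
--         "team_score_first_half": 8,
--     }
--     ctype = candidate.get("pick_type")
--     cmask = masks.get(ctype, 0)
--     for x in existing:
--         xt = x.get("pick_type")
--         if xt == ctype or masks.get(xt, 0) & cmask:
--             return False
--     return True
-- ===== Notes on version B (the rewrite author's own statement) =====
-- stated objective: alternative
-- what changed: B drops A's set-of-existing-types and 4-pair two-branch loop for a bitmask encoding: each conflict pair is one bit, each pick type's mask holds the bits of the pairs it belongs to, and a single pass over existing rejects on type equality (duplicate) or nonzero mask intersection (conflict).
import Mathlib
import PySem

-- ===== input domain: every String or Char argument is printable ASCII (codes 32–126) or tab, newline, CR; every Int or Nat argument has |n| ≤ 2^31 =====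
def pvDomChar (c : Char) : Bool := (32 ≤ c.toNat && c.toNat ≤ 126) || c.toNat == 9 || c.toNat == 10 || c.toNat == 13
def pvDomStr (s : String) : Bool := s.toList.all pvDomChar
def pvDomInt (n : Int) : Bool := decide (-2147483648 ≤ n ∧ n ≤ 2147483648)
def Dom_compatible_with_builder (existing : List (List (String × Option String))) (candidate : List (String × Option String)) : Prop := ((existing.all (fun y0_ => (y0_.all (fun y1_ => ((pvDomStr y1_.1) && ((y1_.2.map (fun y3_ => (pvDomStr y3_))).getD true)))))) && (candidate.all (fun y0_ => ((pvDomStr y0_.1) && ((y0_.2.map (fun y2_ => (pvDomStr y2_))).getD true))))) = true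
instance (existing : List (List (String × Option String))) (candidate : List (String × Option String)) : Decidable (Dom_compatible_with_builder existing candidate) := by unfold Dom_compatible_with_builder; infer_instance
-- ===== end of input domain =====

-- B replaces A's set of existing types plus 4-pair loop by a per-type conflict bitmask and a
-- single pass over existing; objective: alternative (same cost, different encoding).

-- x.get("pick_type") : the stored value (possibly None) or None when the key is absent
def getPick (d : List (String × Option String)) : Option String :=
  match d.find? (fun kv => kv.1 == "pick_type") with
  | some kv => kv.2
  | none => none

-- ===== PORT A =====
-- the 'for a, b in incompatible_pairs' loop with its two early returns, then the final duplicate check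
def cwbLoop (ctype : Option String) (existingTypes : PySem.Set (Option String)) :
    List (String × String) → Bool
  | [] => if PySem.Set.contains existingTypes ctype then false else true
  | (a, b) :: rest =>
    if ctype == some a && PySem.Set.contains existingTypes (some b) then false
    else if ctype == some b && PySem.Set.contains existingTypes (some a) then false
    else cwbLoop ctype existingTypes rest

def compatible_with_builder (existing : List (List (String × Option String))) (candidate : List (String × Option String)) : Bool :=
  let existingTypes : PySem.Set (Option String) := PySem.Set.ofList (existing.map getPick)
  let ctype := getPick candidate
  cwbLoop ctype existingTypes
    [("btts_yes", "btts_no"), ("over_2_5", "under_3_5"),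
     ("winner", "double_chance"), ("team_score_first_half", "btts_no")]

-- ===== PORT B =====
-- the literal 'masks' dict of Source B (values are small nonnegative Python ints)
def cwbMasks : PySem.Dict String Int :=
  (((((((PySem.Dict.empty).insert "btts_yes" 1).insert
      "btts_no" (PySem.Int.bor 1 8)).insert
      "over_2_5" 2).insert
      "under_3_5" 2).insert
      "winner" 4).insert
      "double_chance" 4).insert
      "team_score_first_half" 8

-- masks.get(t, 0); a None key never matches a str key
def maskGet (t : Option String) : Int :=
  match t with
  | some s => (PySem.Dict.get? cwbMasks s).getD 0
  | none => 0

-- the 'for x in existing' loop of Source B: 'if xt == ctype or masks.get(xt, 0) & cmask: return False'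
-- (a Python int is truthy iff nonzero)
def cwbAltLoop (ctype : Option String) (cmask : Int) :
    List (List (String × Option String)) → Bool
  | [] => true
  | x :: rest =>
    let xt := getPick x
    if xt == ctype || (PySem.Int.band (maskGet xt) cmask) != 0 then false
    else cwbAltLoop ctype cmask rest

def compatible_with_builder_alt (existing : List (List (String × Option String))) (candidate : List (String × Option String)) : Bool :=
  let ctype := getPick candidate
  let cmask := maskGet ctype
  cwbAltLoop ctype cmask existing

-- ===== PRECONDITION & SPEC =====
def Spec_compatible_with_builder (existing : List (List (String × Option String))) (candidate : List (String × Option String)) (out : Bool) : Prop := out = compatible_with_builder_alt existing candidate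
instance (existing : List (List (String × Option String))) (candidate : List (String × Option String)) (out : Bool) : Decidable (Spec_compatible_with_builder existing candidate out) := by unfold Spec_compatible_with_builder; infer_instance

-- ===== CLAIM (what is proved, stated in full; the proofs are below) =====
def Claim_equal_compatible_with_builder : Prop := ∀ (existing : List (List (String × Option String))) (candidate : List (String × Option String)), Dom_compatible_with_builder existing candidate → Spec_compatible_with_builder existing candidate (compatible_with_builder existing candidate)

-- ===== LEMMAS AND PROOFS =====

-- the common conflict relation: t (an existing type) clashes with candidate type c
def Hit (c t : Option String) : Prop :=
  t = c ∨
  (c = some "btts_yes" ∧ t = some "btts_no") ∨ (c = some "btts_no" ∧ t = some "btts_yes") ∨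
  (c = some "over_2_5" ∧ t = some "under_3_5") ∨ (c = some "under_3_5" ∧ t = some "over_2_5") ∨
  (c = some "winner" ∧ t = some "double_chance") ∨ (c = some "double_chance" ∧ t = some "winner") ∨
  (c = some "team_score_first_half" ∧ t = some "btts_no") ∨ (c = some "btts_no" ∧ t = some "team_score_first_half")

theorem maskGet_char (u : Option String) : maskGet u =
    if u == some "btts_yes" then 1 else if u == some "btts_no" then 9
    else if u == some "over_2_5" then 2 else if u == some "under_3_5" then 2
    else if u == some "winner" then 4 else if u == some "double_chance" then 4
    else if u == some "team_score_first_half" then 8 else 0 := by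
  rcases u with _ | s
  · simp [maskGet]
  · by_cases h1 : s = "btts_yes"
    · subst h1; decide
    · by_cases h2 : s = "btts_no"
      · subst h2; decide
      · by_cases h3 : s = "over_2_5"
        · subst h3; decide
        · by_cases h4 : s = "under_3_5"
          · subst h4; decide
          · by_cases h5 : s = "winner"
            · subst h5; decide
            · by_cases h6 : s = "double_chance"
              · subst h6; decide
              · by_cases h7 : s = "team_score_first_half"
                · subst h7; decide
                · have e : ∀ a : String, a ≠ s → (a == s) = false := fun a h => by simp [h]
                  simp [maskGet, cwbMasks, PySem.Dict.get?, PySem.Dict.insert,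
                    PySem.Dict.empty, List.find?, h1, h2, h3, h4, h5, h6, h7,
                    e _ (Ne.symm h1), e _ (Ne.symm h2), e _ (Ne.symm h3), e _ (Ne.symm h4),
                    e _ (Ne.symm h5), e _ (Ne.symm h6), e _ (Ne.symm h7)]

set_option maxHeartbeats 1000000 in
theorem hit_pointwise (c t : Option String) :
    ((t == c) || ((PySem.Int.band (maskGet t) (maskGet c)) != 0)) = true ↔ Hit c t := by
  rw [maskGet_char c, maskGet_char t]
  split_ifs <;> simp_all [Hit] <;> decide

theorem altLoop_false_iff (c : Option String) (m : Int)
    (ex : List (List (String × Option String))) :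
    cwbAltLoop c m ex = false ↔
      ∃ x ∈ ex, ((getPick x == c) || ((PySem.Int.band (maskGet (getPick x)) m) != 0)) = true := by
  induction ex with
  | nil => simp [cwbAltLoop]
  | cons x rest ih =>
    simp only [cwbAltLoop]
    split_ifs with h
    · constructor
      · intro _; exact ⟨x, by simp, h⟩
      · intro _; rfl
    · rw [ih]
      constructor
      · rintro ⟨y, hy, hp⟩; exact ⟨y, List.mem_cons_of_mem _ hy, hp⟩
      · rintro ⟨y, hy, hp⟩
        rcases List.mem_cons.mp hy with rfl | hy'
        · exact absurd hp h
        · exact ⟨y, hy', hp⟩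

theorem B_false_iff (existing : List (List (String × Option String))) (candidate : List (String × Option String)) :
    compatible_with_builder_alt existing candidate = false ↔
      ∃ t ∈ existing.map getPick, Hit (getPick candidate) t := by
  unfold compatible_with_builder_alt
  rw [altLoop_false_iff]
  constructor
  · rintro ⟨x, hx, hp⟩
    exact ⟨getPick x, List.mem_map_of_mem hx, (hit_pointwise _ _).mp hp⟩
  · rintro ⟨t, ht, hh⟩
    rcases List.mem_map.mp ht with ⟨x, hx, rfl⟩
    exact ⟨x, hx, (hit_pointwise _ _).mpr hh⟩

theorem A_false_iff (existing : List (List (String × Option String))) (candidate : List (String × Option String)) :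
    compatible_with_builder existing candidate = false ↔
      ∃ t ∈ existing.map getPick, Hit (getPick candidate) t := by
  unfold compatible_with_builder
  simp only [cwbLoop]
  have hmem : ∀ x : Option String,
      PySem.Set.contains (PySem.Set.ofList (existing.map getPick)) x = true ↔
        x ∈ existing.map getPick := by
    intro x
    rw [PySem.Set.contains_iff, PySem.Set.mem_ofList]
  split_ifs with h1 h2 h3 h4 h5 h6 h7 h8 h9
  · obtain ⟨hc, hb⟩ : getPick candidate = some "btts_yes" ∧ some "btts_no" ∈ existing.map getPick := by
      simpa [hmem] using h1
    exact iff_of_true rfl ⟨_, hb, by simp [Hit, hc]⟩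
  · obtain ⟨hc, hb⟩ : getPick candidate = some "btts_no" ∧ some "btts_yes" ∈ existing.map getPick := by
      simpa [hmem] using h2
    exact iff_of_true rfl ⟨_, hb, by simp [Hit, hc]⟩
  · obtain ⟨hc, hb⟩ : getPick candidate = some "over_2_5" ∧ some "under_3_5" ∈ existing.map getPick := by
      simpa [hmem] using h3
    exact iff_of_true rfl ⟨_, hb, by simp [Hit, hc]⟩
  · obtain ⟨hc, hb⟩ : getPick candidate = some "under_3_5" ∧ some "over_2_5" ∈ existing.map getPick := by
      simpa [hmem] using h4
    exact iff_of_true rfl ⟨_, hb, by simp [Hit, hc]⟩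
  · obtain ⟨hc, hb⟩ : getPick candidate = some "winner" ∧ some "double_chance" ∈ existing.map getPick := by
      simpa [hmem] using h5
    exact iff_of_true rfl ⟨_, hb, by simp [Hit, hc]⟩
  · obtain ⟨hc, hb⟩ : getPick candidate = some "double_chance" ∧ some "winner" ∈ existing.map getPick := by
      simpa [hmem] using h6
    exact iff_of_true rfl ⟨_, hb, by simp [Hit, hc]⟩
  · obtain ⟨hc, hb⟩ : getPick candidate = some "team_score_first_half" ∧ some "btts_no" ∈ existing.map getPick := by
      simpa [hmem] using h7
    exact iff_of_true rfl ⟨_, hb, by simp [Hit, hc]⟩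
  · obtain ⟨hc, hb⟩ : getPick candidate = some "btts_no" ∧ some "team_score_first_half" ∈ existing.map getPick := by
      simpa [hmem] using h8
    exact iff_of_true rfl ⟨_, hb, by simp [Hit, hc]⟩
  · have hb : getPick candidate ∈ existing.map getPick := (hmem _).mp h9
    exact iff_of_true rfl ⟨_, hb, Or.inl rfl⟩
  · refine iff_of_false (by simp) ?_
    rintro ⟨t, ht, hC | ⟨hc, rfl⟩ | ⟨hc, rfl⟩ | ⟨hc, rfl⟩ | ⟨hc, rfl⟩ | ⟨hc, rfl⟩ |
      ⟨hc, rfl⟩ | ⟨hc, rfl⟩ | ⟨hc, rfl⟩⟩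
    · exact h9 ((hmem _).mpr (hC ▸ ht))
    · exact h1 (by simp [hc, PySem.Set.mem_ofList, ht])
    · exact h2 (by simp [hc, PySem.Set.mem_ofList, ht])
    · exact h3 (by simp [hc, PySem.Set.mem_ofList, ht])
    · exact h4 (by simp [hc, PySem.Set.mem_ofList, ht])
    · exact h5 (by simp [hc, PySem.Set.mem_ofList, ht])
    · exact h6 (by simp [hc, PySem.Set.mem_ofList, ht])
    · exact h7 (by simp [hc, PySem.Set.mem_ofList, ht])
    · exact h8 (by simp [hc, PySem.Set.mem_ofList, ht])

theorem cwb_main (existing : List (List (String × Option String))) (candidate : List (String × Option String)) :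
    compatible_with_builder existing candidate = compatible_with_builder_alt existing candidate := by
  have h := (A_false_iff existing candidate).trans (B_false_iff existing candidate).symm
  rcases ha : compatible_with_builder existing candidate <;>
    rcases hb : compatible_with_builder_alt existing candidate <;> simp_all

-- ===== VERDICT (by name: the statement is the Claim_ definition above) =====
theorem compatible_with_builder_spec : Claim_equal_compatible_with_builder := by
  intro existing candidate _
  exact cwb_main existing candidate
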